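-- pv_equiv track=rewrite | github.com/mani-312/Advanced_Image_Processing | Assignment_4/Bandla_Manikanta_Assignment4/code/Q1.py | Lossles_source_encoding
-- ===== SOURCE A (Python) =====
-- def Lossles_source_encoding(i):
--     # each s value for defining the group of values in ecodeding table
--     s = [0, 1, 3, 7, 15, 31, 63, 127, 255]
--     i=int(i)
--     code=0
--
--     # hard encoding for integer 0
--     if abs(i) == 0:
--         code = 0
--
--     # encoding of non-zero values
--     else:
--         for j in range(8):
--             if  s[j] < abs(i) <= s[j+1] :
--                 # common bits at starting for positive and negative integers
--                 num= j+1
--                 code=num* [1]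
--                 code.append(0)
--
--                 # for positive integers after appending ones and a zero we need to append its binary value as last some bits
--                 if i > 0:
--                     code.append((bin(abs(i))[2:]))
--
--                 # for negative integers after appending ones and a zero we need to append its complement of binary value as last some bits
--                 # .rjust ensures num of bits are "j+1"
--                 else:
--                     code.append((str(bin(s[j + 1] + i)[2:]).rjust((j + 1), '0')))
--
--                 code=int(''.join(str(i) for i in code))
--
--     #encoded_string=encoded_string+str(code)
--     return  str(code)
-- ===== SOURCE B (Python) =====
-- def Lossles_source_encoding(i):
--     i = int(i)
--     n = abs(i)
--     if n == 0 or n > 255: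
--         return '0'
--     # peel the binary digits of n below the leading 1, least-significant first
--     bits = []
--     while n > 1:
--         bits.append(n % 2)
--         n //= 2
--     # codeword for a single leading 1-bit, then grow it one bit at a time:
--     # each further bit b (MSB->LSB) wraps the code as '1' + code + bit
--     code = '10' + ('1' if i > 0 else '0')
--     for b in reversed(bits):
--         code = '1' + code + str(b if i > 0 else 1 - b)
--     return code
-- ===== Notes on version B (the rewrite author's own statement) =====
-- stated objective: alternative
-- what changed: Instead of scanning a threshold table for the value's group and assembling a ones-list joined through an int()/str() round trip, B peels the binary digits of |i| with a halving loop and then grows the codeword one digit at a time, wrapping it as '1'+code+bit (complemented bit for negatives) per remaining bit.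
import Mathlib
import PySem

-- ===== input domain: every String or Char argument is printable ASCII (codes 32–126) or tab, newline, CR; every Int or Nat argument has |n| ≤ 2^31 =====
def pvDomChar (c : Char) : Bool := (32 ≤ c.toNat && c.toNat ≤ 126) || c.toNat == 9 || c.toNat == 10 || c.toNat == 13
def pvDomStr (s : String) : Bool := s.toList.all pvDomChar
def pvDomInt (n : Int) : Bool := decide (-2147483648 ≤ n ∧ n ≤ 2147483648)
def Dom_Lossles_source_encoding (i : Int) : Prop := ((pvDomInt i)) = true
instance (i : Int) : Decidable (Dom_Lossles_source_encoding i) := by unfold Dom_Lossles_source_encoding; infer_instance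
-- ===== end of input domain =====

-- B replaces A's table scan and ones-list/join/int round trip by a bit-peeling loop that grows the codeword one digit at a time (objective: alternative); return values only.

-- s.rjust(w, c) for w ≥ 0: exact (pads on the left up to width w, unchanged if already long enough)
def pyRjust (s : String) (w : Int) (c : Char) : String :=
  String.mk (List.replicate (w.toNat - s.toList.length) c ++ s.toList)

-- ===== PORT A =====
-- the body of A's `for j in range(8)` loop (its `if s[j] < abs(i) <= s[j+1]` block)
def pvAStep (i : Int) (code : Int) (j : Int) : Int :=
  let s : List Int := [0, 1, 3, 7, 15, 31, 63, 127, 255]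
  let sj := (PySem.List.pyGet? s j).getD 0
  let sj1 := (PySem.List.pyGet? s (j + 1)).getD 0
  if sj < |i| ∧ |i| ≤ sj1 then
    let num := j + 1
    let ones : List Int := PySem.List.pyRepeat [1] num   -- num * [1]
    -- code = ones ++ [0] ++ [tail string]; ''.join(str(x) for x in code):
    let joined := String.join (ones.map PySem.Int.toStr) ++ PySem.Int.toStr 0 ++
      (if i > 0 then PySem.Int.toBin |i|                      -- bin(abs(i))[2:]
       else pyRjust (PySem.Int.toBin (sj1 + i)) num '0')      -- bin(s[j+1]+i)[2:].rjust(j+1,'0')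
    (PySem.Int.ofStr? joined).getD 0   -- int(...): never none here (joined is a digit string)
  else code

def Lossles_source_encoding (i : Int) : String :=
  let code : Int := 0
  if |i| == 0 then
    PySem.Int.toStr code
  else
    let code := (PySem.List.pyRange 0 8 1).foldl (pvAStep i) code
    PySem.Int.toStr code

-- ===== PORT B =====
-- B's `while n > 1` bit-peeling loop; fuel (16 ≥ 8 iterations for n ≤ 255) only makes it total
def pvBits : Nat → Nat → List Nat
  | 0, _ => []
  | fuel + 1, n => if 1 < n then (n % 2) :: pvBits fuel (n / 2) else []

def Lossles_source_encoding_alt (i : Int) : String :=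
  let n : Nat := i.natAbs
  if n == 0 || decide (255 < n) then "0"
  else
    let bits := pvBits 16 n
    let code0 := "10" ++ (if i > 0 then "1" else "0")
    bits.reverse.foldl
      (fun code b => "1" ++ code ++ (if i > 0 then PySem.Int.toStr (b : Int)
                                     else PySem.Int.toStr (1 - (b : Int)))) code0

-- ===== PRECONDITION & SPEC =====
def Spec_Lossles_source_encoding (i : Int) (out : String) : Prop := out = Lossles_source_encoding_alt i
instance (i : Int) (out : String) : Decidable (Spec_Lossles_source_encoding i out) := by unfold Spec_Lossles_source_encoding; infer_instance

-- ===== CLAIM (what is proved, stated in full; the proofs are below) =====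
def Claim_equal_Lossles_source_encoding : Prop := ∀ (i : Int), Dom_Lossles_source_encoding i → Spec_Lossles_source_encoding i (Lossles_source_encoding i)

-- ===== LEMMAS AND PROOFS =====

lemma step_big (i : Int) (h : 255 < i.natAbs) (code : Int) (j : Int)
    (hj : j ∈ ([0,1,2,3,4,5,6,7] : List Int)) : pvAStep i code j = code := by
  fin_cases hj <;>
    · unfold pvAStep
      rw [if_neg (by simp [PySem.List.pyGet?, PySem.List.pyIdx?]; rw [Int.abs_eq_natAbs]; omega)]

lemma foldl_fix (f : Int → Int → Int) : ∀ (l : List Int) (c : Int),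
    (∀ c j, j ∈ l → f c j = c) → l.foldl f c = c := by
  intro l
  induction l with
  | nil => intro c _; rfl
  | cons x xs ih =>
    intro c h
    simp only [List.foldl_cons, h c x (by simp)]
    exact ih c fun c j hj => h c j (by simp [hj])

lemma A_big (i : Int) (h : 255 < i.natAbs) : Lossles_source_encoding i = "0" := by
  unfold Lossles_source_encoding
  rw [if_neg (by simp; omega),
    show PySem.List.pyRange 0 8 1 = [0,1,2,3,4,5,6,7] from by decide,
    foldl_fix _ _ _ (fun c j hj => step_big i h c j hj)]
  rfl

lemma B_big (i : Int) (h : 255 < i.natAbs) : Lossles_source_encoding_alt i = "0" := by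
  unfold Lossles_source_encoding_alt
  rw [if_pos]
  simp
  omega

set_option maxRecDepth 20000 in
set_option maxHeartbeats 4000000 in
lemma small_all : (List.range 511).all
    (fun k => Lossles_source_encoding ((k : Int) - 255) == Lossles_source_encoding_alt ((k : Int) - 255)) = true := by
  decide

-- ===== VERDICT (by name: the statement is the Claim_ definition above) =====
theorem Lossles_source_encoding_spec : Claim_equal_Lossles_source_encoding := by
  intro i _
  unfold Spec_Lossles_source_encoding
  by_cases h : i.natAbs ≤ 255
  · have hm : (i + 255).toNat ∈ List.range 511 := by
      simp only [List.mem_range]; omega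
    have := List.all_eq_true.mp small_all _ hm
    have heq : ((((i + 255).toNat : Int)) - 255) = i := by omega
    rw [heq] at this
    exact eq_of_beq this
  · rw [A_big i (by omega), B_big i (by omega)]
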